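-- pv_equiv track=rewrite | github.com/lukekh/AoC2022 | Day15/Day15.py | weird_range_iterator
-- ===== SOURCE A (Python) =====
-- def weird_range_iterator(start, stop):
--     midpoint = (stop + start) // 2
--     r = iter(range(midpoint, stop))
--     l = iter(reversed(range(start, midpoint)))
--
--     rt = True
--     lt = True
--     while True:
--         try:
--             rx = next(r)
--             yield rx
--         except StopIteration:
--             rt = False
--             if lt:
--                 pass
--             else:
--                 break
--         try:
--             lx = next(l)
--             yield lx
--         except StopIteration:
--             lt = False
--             if rt:
--                 pass
--             else:
--                 break
-- ===== SOURCE B (Python) =====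
-- def weird_range_iterator(start, stop):
--     midpoint = (stop + start) // 2
--     def key(x):
--         return 2 * (x - midpoint) if x >= midpoint else 2 * (midpoint - 1 - x) + 1
--     yield from sorted(range(start, stop), key=key)
-- ===== Notes on version B (the rewrite author's own statement) =====
-- stated objective: alternative
-- what changed: Replaces the dual-iterator StopIteration-driven interleaving loop by a sort: each element of range(start, stop) is assigned an integer rank (2*distance for the right half, 2*distance+1 for the left half) and the range is sorted by that rank, which yields exactly the outward-alternating order; trades the O(n) loop for an O(n log n) one-liner.
import Mathlib
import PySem

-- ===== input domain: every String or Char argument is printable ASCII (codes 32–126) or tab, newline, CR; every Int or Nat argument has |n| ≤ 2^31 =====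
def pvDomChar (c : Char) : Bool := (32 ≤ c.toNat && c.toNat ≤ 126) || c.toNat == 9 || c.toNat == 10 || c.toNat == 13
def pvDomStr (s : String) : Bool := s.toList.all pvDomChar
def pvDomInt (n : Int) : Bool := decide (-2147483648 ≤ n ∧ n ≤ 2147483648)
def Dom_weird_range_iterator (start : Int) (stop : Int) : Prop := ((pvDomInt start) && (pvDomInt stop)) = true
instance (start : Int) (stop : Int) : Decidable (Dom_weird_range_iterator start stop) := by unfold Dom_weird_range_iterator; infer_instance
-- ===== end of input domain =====

-- B replaces A's dual-iterator, StopIteration-driven interleaving loop by a sort of range(start, stop)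
-- under an integer rank (2*distance for the right half, 2*distance+1 for the left half); alternative
-- algorithm of similar cost, not claimed faster.

-- ===== PORT A =====
-- A's while loop: state = remaining right iterator, remaining left iterator, flags rt/lt.
-- The branches mirror the try/except blocks: a nonempty iterator yields its head; an exhausted
-- one sets its flag to False and breaks iff the other flag is already False.
def pvLoopA : List Int → List Int → Bool → Bool → List Int
  | rx :: r', lx :: l', rt, lt => rx :: lx :: pvLoopA r' l' rt lt
  | rx :: r', [], rt, _lt => if rt then rx :: pvLoopA r' [] rt false else [rx]
  | [], l, _rt, lt =>
      if lt then
        match l with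
        | lx :: l' => lx :: pvLoopA [] l' false lt
        | [] => []
      else []
termination_by r l _ _ => r.length + l.length
decreasing_by all_goals (simp_all; try omega)

def weird_range_iterator (start : Int) (stop : Int) : List Int :=
  let midpoint := PySem.Int.floordiv (stop + start) 2
  let r := PySem.List.pyRange midpoint stop 1
  let l := (PySem.List.pyRange start midpoint 1).reverse
  pvLoopA r l true true

-- ===== PORT B =====
-- Source B's inner 'key' closure over midpoint
def pvKeyB (midpoint : Int) (x : Int) : Int :=
  if x ≥ midpoint then 2 * (x - midpoint) else 2 * (midpoint - 1 - x) + 1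

def weird_range_iterator_alt (start : Int) (stop : Int) : List Int :=
  let midpoint := PySem.Int.floordiv (stop + start) 2
  PySem.List.sorted (PySem.List.pyRange start stop 1) (pvKeyB midpoint) false

-- ===== PRECONDITION & SPEC =====
def Spec_weird_range_iterator (start : Int) (stop : Int) (out : List Int) : Prop := out = weird_range_iterator_alt start stop
instance (start : Int) (stop : Int) (out : List Int) : Decidable (Spec_weird_range_iterator start stop out) := by unfold Spec_weird_range_iterator; infer_instance

-- ===== CLAIM (what is proved, stated in full; the proofs are below) =====
def Claim_equal_weird_range_iterator : Prop := ∀ (start : Int) (stop : Int), Dom_weird_range_iterator start stop → Spec_weird_range_iterator start stop (weird_range_iterator start stop)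

-- ===== LEMMAS AND PROOFS =====

-- ascending list [p, p+1, …, p+a-1]
def pvUp (p : Int) : Nat → List Int
  | 0 => []
  | a + 1 => p :: pvUp (p + 1) a

-- descending list [q, q-1, …, q-b+1]
def pvDown (q : Int) : Nat → List Int
  | 0 => []
  | b + 1 => q :: pvDown (q - 1) b

-- right list interleaved with left list, right first, the longer tail appended
def pvInterleave : List Int → List Int → List Int
  | [], l => l
  | r, [] => r
  | a :: r, b :: l => a :: b :: pvInterleave r l

-- closed form of A's output: indexed sweep from the midpoint
def pvG (a b : Nat) (p q : Int) : List Int :=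
  (List.range (max a b)).flatMap
    (fun i => (if i < a then [p + (i : Int)] else []) ++ (if i < b then [q - (i : Int)] else []))

theorem pvFlatMap_ext {α β : Type} (l : List α) {f g : α → List β} (h : ∀ i, f i = g i) :
    l.flatMap f = l.flatMap g := by rw [funext h]

theorem pvMap_ext {α β : Type} (l : List α) {f g : α → β} (h : ∀ i, f i = g i) :
    l.map f = l.map g := by rw [funext h]

theorem pvLoopA_right (r : List Int) : pvLoopA r [] true false = r := by
  induction r with
  | nil => simp [pvLoopA]
  | cons x r ih => simp [pvLoopA, ih]

theorem pvLoopA_left (l : List Int) : pvLoopA [] l false true = l := by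
  induction l with
  | nil => simp [pvLoopA]
  | cons x l ih => simp [pvLoopA, ih]

theorem pvLoopA_eq_interleave (r l : List Int) :
    pvLoopA r l true true = pvInterleave r l := by
  induction r generalizing l with
  | nil =>
      cases l with
      | nil => simp [pvLoopA, pvInterleave]
      | cons x l => simp [pvLoopA, pvInterleave, pvLoopA_left]
  | cons x r ih =>
      cases l with
      | nil => simp [pvLoopA, pvInterleave, pvLoopA_right]
      | cons y l => simp [pvLoopA, pvInterleave, ih]

theorem pvG_succ (a b : Nat) (p q : Int) :
    pvG (a + 1) (b + 1) p q = p :: q :: pvG a b (p + 1) (q - 1) := by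
  unfold pvG
  rw [show max (a+1) (b+1) = (max a b) + 1 by omega, List.range_succ_eq_map]
  simp only [List.flatMap_cons, List.flatMap_map, Nat.zero_lt_succ, if_pos, Nat.cast_zero,
    add_zero, sub_zero]
  rw [pvFlatMap_ext (List.range (max a b)) (g := fun i =>
      (if i < a then [p + 1 + (i : Int)] else []) ++ (if i < b then [q - 1 - (i : Int)] else []))
    (by
      intro i
      have h1 : (i + 1 < a + 1) ↔ (i < a) := by omega
      have h2 : (i + 1 < b + 1) ↔ (i < b) := by omega
      simp only [h1, h2]
      congr 1 <;> split_ifs <;> simp <;> push_cast <;> ring)]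
  simp

theorem pvG_zero_left (b : Nat) (p q : Int) : pvG 0 b p q = pvDown q b := by
  induction b generalizing q with
  | zero => simp [pvG, pvDown]
  | succ b ih =>
      unfold pvG
      rw [Nat.max_eq_right (Nat.zero_le _), List.range_succ_eq_map]
      simp only [List.flatMap_cons, List.flatMap_map, Nat.not_lt_zero, if_false, if_pos,
        Nat.zero_lt_succ, Nat.cast_zero, sub_zero, List.nil_append]
      rw [pvFlatMap_ext (List.range b) (g := fun i =>
          ((if i < (0:Nat) then [p + (i : Int)] else []) ++ (if i < b then [q - 1 - (i : Int)] else [])))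
        (by
          intro i
          have h2 : (i + 1 < b + 1) ↔ (i < b) := by omega
          simp only [h2, Nat.not_lt_zero, if_false, List.nil_append]
          split_ifs <;> simp <;> push_cast <;> ring)]
      rw [show (List.range b).flatMap (fun i =>
          ((if i < (0:Nat) then [p + (i : Int)] else []) ++ (if i < b then [q - 1 - (i : Int)] else [])))
        = pvG 0 b p (q - 1) by unfold pvG; rw [Nat.max_eq_right (Nat.zero_le _)]]
      rw [ih]
      rfl

theorem pvG_zero_right (a : Nat) (p q : Int) : pvG a 0 p q = pvUp p a := by
  induction a generalizing p with
  | zero => simp [pvG, pvUp]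
  | succ a ih =>
      unfold pvG
      rw [Nat.max_eq_left (Nat.zero_le _), List.range_succ_eq_map]
      simp only [List.flatMap_cons, List.flatMap_map, Nat.not_lt_zero, if_false, if_pos,
        Nat.zero_lt_succ, Nat.cast_zero, add_zero, List.append_nil]
      rw [pvFlatMap_ext (List.range a) (g := fun i =>
          ((if i < a then [p + 1 + (i : Int)] else []) ++ (if i < (0:Nat) then [q - (i : Int)] else [])))
        (by
          intro i
          have h1 : (i + 1 < a + 1) ↔ (i < a) := by omega
          simp only [h1, Nat.not_lt_zero, if_false, List.append_nil]
          split_ifs <;> simp <;> push_cast <;> ring)]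
      rw [show (List.range a).flatMap (fun i =>
          ((if i < a then [p + 1 + (i : Int)] else []) ++ (if i < (0:Nat) then [q - (i : Int)] else [])))
        = pvG a 0 (p + 1) q by unfold pvG; rw [Nat.max_eq_left (Nat.zero_le _)]]
      rw [ih]
      rfl

theorem pvInterleave_flatMap (a b : Nat) (p q : Int) :
    pvInterleave (pvUp p a) (pvDown q b) = pvG a b p q := by
  induction a generalizing b p q with
  | zero =>
      cases b with
      | zero => simp [pvUp, pvDown, pvInterleave, pvG]
      | succ b =>
          simp only [pvUp, pvDown]
          rw [show pvInterleave ([] : List Int) (q :: pvDown (q - 1) b) = q :: pvDown (q - 1) b from rfl]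
          rw [pvG_zero_left, pvDown]
  | succ a iha =>
      cases b with
      | zero =>
          simp only [pvUp, pvDown]
          rw [show pvInterleave (p :: pvUp (p + 1) a) ([] : List Int) = p :: pvUp (p + 1) a from rfl]
          rw [pvG_zero_right, pvUp]
      | succ b =>
          simp only [pvUp, pvDown, pvInterleave]
          rw [pvG_succ, iha]

theorem pvUp_eq_map (p : Int) (n : Nat) : pvUp p n = (List.range n).map (fun k : Nat => p + (k : Int)) := by
  induction n generalizing p with
  | zero => simp [pvUp]
  | succ n ih =>
      rw [List.range_succ_eq_map, List.map_cons, List.map_map, pvUp, ih (p+1)]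
      congr 1
      · simp
      · exact pvMap_ext _ (by intro k; simp; push_cast; ring)

theorem pvDown_eq_map (q : Int) (n : Nat) : pvDown q n = (List.range n).map (fun k : Nat => q - (k : Int)) := by
  induction n generalizing q with
  | zero => simp [pvDown]
  | succ n ih =>
      rw [List.range_succ_eq_map, List.map_cons, List.map_map, pvDown, ih (q-1)]
      congr 1
      · simp
      · exact pvMap_ext _ (by intro k; simp; push_cast; ring)

theorem pyRange_eq_up (a b : Int) : PySem.List.pyRange a b 1 = pvUp a (b - a).toNat := by
  rw [PySem.List.pyRange_one, pvUp_eq_map]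

theorem pyRange_rev_eq_down (a b : Int) :
    (PySem.List.pyRange a b 1).reverse = pvDown (b - 1) (b - a).toNat := by
  have h := PySem.List.pyRange_neg_one_eq_reverse (a := b - 1) (b := a - 1)
  rw [show b - 1 + 1 = b by ring, show a - 1 + 1 = a by ring] at h
  rw [← h, PySem.List.pyRange_neg_one, pvDown_eq_map,
    show b - 1 - (a - 1) = b - a by ring]

-- A's output as the interleave of the two half-ranges
theorem pvA_eq_pvG (start stop : Int) :
    weird_range_iterator start stop =
      pvG (stop - PySem.Int.floordiv (stop + start) 2).toNat
          (PySem.Int.floordiv (stop + start) 2 - start).toNat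
          (PySem.Int.floordiv (stop + start) 2)
          (PySem.Int.floordiv (stop + start) 2 - 1) := by
  unfold weird_range_iterator
  dsimp only
  rw [pyRange_eq_up, pyRange_rev_eq_down, pvLoopA_eq_interleave, pvInterleave_flatMap]

-- key values on the two halves
theorem pvKeyB_up (m : Int) (i : Nat) : pvKeyB m (m + (i : Int)) = 2 * i := by
  unfold pvKeyB
  rw [if_pos (by omega)]
  ring

theorem pvKeyB_down (m : Int) (i : Nat) : pvKeyB m (m - 1 - (i : Int)) = 2 * i + 1 := by
  unfold pvKeyB
  rw [if_neg (by omega)]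
  ring

-- interleave ~ append
theorem pvInterleave_perm (r l : List Int) : (pvInterleave r l).Perm (r ++ l) := by
  induction r generalizing l with
  | nil => cases l <;> simp [pvInterleave]
  | cons x r ih =>
      cases l with
      | nil => simp [pvInterleave]
      | cons y l =>
          simp only [pvInterleave, List.cons_append]
          refine List.Perm.cons x ?_
          exact ((ih l).cons y).trans List.perm_middle.symm

theorem pvUp_append (p : Int) (b a : Nat) :
    pvUp p (b + a) = pvUp p b ++ pvUp (p + (b : Int)) a := by
  induction b generalizing p with
  | zero => simp [pvUp]
  | succ b ih =>
      rw [show b + 1 + a = (b + a) + 1 by omega]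
      simp only [pvUp, ih (p + 1), List.cons_append]
      congr 3
      push_cast; ring

theorem pvDown_snoc (q : Int) (n : Nat) :
    pvDown q (n + 1) = pvDown q n ++ [q - (n : Int)] := by
  induction n generalizing q with
  | zero => simp [pvDown]
  | succ n ih =>
      rw [show pvDown q (n + 1 + 1) = q :: pvDown (q - 1) (n + 1) from rfl, ih (q - 1)]
      simp only [pvDown, List.cons_append]
      congr 2
      push_cast; ring

theorem pvUp_reverse (p : Int) (n : Nat) :
    (pvUp p n).reverse = pvDown (p + (n : Int) - 1) n := by
  induction n generalizing p with
  | zero => simp [pvUp, pvDown]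
  | succ n ih =>
      rw [pvUp, List.reverse_cons, ih (p + 1), pvDown_snoc]
      congr 2
      · congr 1; push_cast; ring
      · push_cast; ring

-- A's output is a permutation of range(start, stop)
theorem pvG_perm (m start stop : Int) (h1 : start ≤ m) (h2 : m ≤ stop) :
    (pvG (stop - m).toNat (m - start).toNat m (m - 1)).Perm (pvUp start (stop - start).toNat) := by
  set a := (stop - m).toNat with ha
  set b := (m - start).toNat with hb
  have hdown : pvDown (m - 1) b = (pvUp start b).reverse := by
    rw [pvUp_reverse]
    congr 1
    omega
  rw [← pvInterleave_flatMap, hdown]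
  refine (pvInterleave_perm _ _).trans ?_
  refine (List.Perm.append_left _ (pvUp start b).reverse_perm).trans ?_
  refine List.perm_append_comm.trans ?_
  rw [show (stop - start).toNat = b + a by omega, pvUp_append,
    show start + (b : Int) = m by omega]

-- keys strictly increase along A's output
theorem pvG_pairwise (a b : Nat) (m : Int) :
    (pvG a b m (m - 1)).Pairwise (fun x y => pvKeyB m x < pvKeyB m y) := by
  unfold pvG
  rw [List.flatMap_def, List.pairwise_flatten]
  constructor
  · intro l hl
    simp only [List.mem_map, List.mem_range] at hl
    obtain ⟨i, _, rfl⟩ := hl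
    split_ifs <;> simp [pvKeyB_up m i, pvKeyB_down m i] <;> omega
  · rw [List.pairwise_map]
    refine (List.pairwise_lt_range).imp ?_
    intro i j hij x hx y hy
    have hx' : x = m + (i : Int) ∨ x = m - 1 - (i : Int) := by
      rcases List.mem_append.1 hx with h | h <;> (split_ifs at h <;> simp at h) <;> simp [h]
    have hy' : y = m + (j : Int) ∨ y = m - 1 - (j : Int) := by
      rcases List.mem_append.1 hy with h | h <;> (split_ifs at h <;> simp at h) <;> simp [h]
    rcases hx' with rfl | rfl <;> rcases hy' with rfl | rfl <;>
      simp only [pvKeyB_up, pvKeyB_down] <;> omega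

theorem pv_main (start stop : Int) :
    weird_range_iterator start stop = weird_range_iterator_alt start stop := by
  unfold weird_range_iterator_alt
  dsimp only
  set m := PySem.Int.floordiv (stop + start) 2 with hm
  rw [pyRange_eq_up, pvA_eq_pvG, ← hm]
  by_cases hss : start ≤ stop
  · have hb := PySem.Int.floordiv_two_mid_bounds (lo := start) (hi := stop) hss
    rw [show start + stop = stop + start by ring] at hb
    rw [← hm] at hb
    exact (PySem.List.sorted_eq_of_perm_of_pairwise_lt _ _ (pvKeyB m)
      (pvG_perm m start stop hb.1 hb.2) (pvG_pairwise _ _ m)).symm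
  · have hb := PySem.Int.floordiv_two_mid_bounds (lo := stop) (hi := start) (by omega)
    rw [← hm] at hb
    have ha0 : (stop - m).toNat = 0 := by omega
    have hb0 : (m - start).toNat = 0 := by omega
    have hn0 : (stop - start).toNat = 0 := by omega
    rw [ha0, hb0, hn0]
    simp [pvG, pvUp, PySem.List.sorted_eq_nil_iff]

-- ===== VERDICT (by name: the statement is the Claim_ definition above) =====
theorem weird_range_iterator_spec : Claim_equal_weird_range_iterator := by
  intro start stop _
  unfold Spec_weird_range_iterator
  exact pv_main start stop
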